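-- pv_equiv track=rewrite | github.com/je488/Algorithm-Study | 백준/BOJ_20327.py | op5
-- ===== SOURCE A (Python) =====
-- def op5(a, l):
--     n = len(a)
--     ans = [[0] * n for _ in range(n)]
--     sub_size = (1 << l)
--     sub_count = n // sub_size
--     for i in range(sub_count):
--         for j in range(sub_count):
--             x1 = i * sub_size
--             y1 = j * sub_size
--             x2 = (sub_count-i-1) * sub_size
--             y2 = j * sub_size
--             for x in range(sub_size):
--                 for y in range(sub_size):
--                     ans[x1+x][y1+y] = a[x2+x][y2+y]
--     return ans
-- ===== SOURCE B (Python) =====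
-- def op5(a, l):
--     n = len(a)
--     s = 1 << l
--     m = (n // s) * s
--     blocks = [a[k * s:(k + 1) * s] for k in range(n // s)]
--     blocks.reverse()
--     body = [row[:m] + [0] * (n - m) for blk in blocks for row in blk]
--     return body + [[0] * n for _ in range(n - m)]
-- ===== Notes on version B (the rewrite author's own statement) =====
-- stated objective: alternative
-- what changed: Instead of A's four nested block/offset loops writing cells into a preallocated zero matrix, B treats the matrix as data: it cuts the first n//s * s rows into s-row chunks, reverses the chunk list, flattens it back (padding each kept row and appending zero rows for the border), so no destination index is ever computed.
import Mathlib
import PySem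

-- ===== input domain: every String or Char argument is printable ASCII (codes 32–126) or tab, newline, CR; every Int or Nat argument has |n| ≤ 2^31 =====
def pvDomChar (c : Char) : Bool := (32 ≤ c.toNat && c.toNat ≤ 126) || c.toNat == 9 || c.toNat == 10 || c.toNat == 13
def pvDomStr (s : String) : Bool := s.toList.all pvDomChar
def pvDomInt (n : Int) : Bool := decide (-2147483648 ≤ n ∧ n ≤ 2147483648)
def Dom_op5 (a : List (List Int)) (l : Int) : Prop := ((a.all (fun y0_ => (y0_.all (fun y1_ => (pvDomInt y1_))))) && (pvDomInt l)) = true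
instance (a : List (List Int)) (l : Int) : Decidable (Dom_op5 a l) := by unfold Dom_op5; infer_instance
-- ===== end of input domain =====

-- B replaces A's four nested block/offset loops (per-cell writes into a zero matrix) by a
-- chunk / reverse / flatten pipeline on the row list (objective: alternative).

-- ===== PORT A =====
-- ans[r][c] = v  (List.set is a no-op out of range, which never happens on admitted inputs)
def pvWrite (mat : List (List Int)) (r c : Nat) (v : Int) : List (List Int) :=
  mat.set r ((mat.getD r []).set c v)

def op5 (a : List (List Int)) (l : Int) : List (List Int) :=
  let n := a.length
  let ans0 := (List.range n).map (fun _ => List.replicate n (0 : Int))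
  let sub_size := 2 ^ l.toNat          -- 1 << l ; Pre_ gives 0 ≤ l
  let sub_count := n / sub_size
  (List.range sub_count).foldl (fun ans i =>
    (List.range sub_count).foldl (fun ans j =>
      let x1 := i * sub_size
      let y1 := j * sub_size
      let x2 := (sub_count - i - 1) * sub_size
      let y2 := j * sub_size
      (List.range sub_size).foldl (fun ans x =>
        (List.range sub_size).foldl (fun ans y =>
          pvWrite ans (x1 + x) (y1 + y) ((a.getD (x2 + x) []).getD (y2 + y) 0)
        ) ans) ans) ans) ans0

-- ===== PORT B =====
def op5_alt (a : List (List Int)) (l : Int) : List (List Int) :=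
  let n := a.length
  let s := 2 ^ l.toNat                 -- 1 << l ; Pre_ gives 0 ≤ l
  let m := (n / s) * s
  let blocks := (List.range (n / s)).map (fun k =>
    PySem.List.slice a (some ((k * s : Nat) : Int)) (some (((k + 1) * s : Nat) : Int)))
  let blocks := blocks.reverse
  let body := blocks.flatMap (fun blk => blk.map (fun row =>
    PySem.List.slice row none (some ((m : Nat) : Int)) ++ List.replicate (n - m) (0 : Int)))
  body ++ (List.range (n - m)).map (fun _ => List.replicate n (0 : Int))

-- ===== PRECONDITION & SPEC =====
-- Pre_ excludes exactly the inputs where A raises: l < 0 (ValueError on 1 << l) and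
-- matrices whose first m = (n // 2^l) * 2^l rows are shorter than m (IndexError).
def Pre_op5 (a : List (List Int)) (l : Int) : Prop :=
  0 ≤ l ∧ ∀ i < a.length / 2 ^ l.toNat * 2 ^ l.toNat,
    a.length / 2 ^ l.toNat * 2 ^ l.toNat ≤ (a.getD i []).length
instance (a : List (List Int)) (l : Int) : Decidable (Pre_op5 a l) := by unfold Pre_op5; infer_instance
def pvWitness_op5 : List (List Int) × Int := ([[1, 2], [3, 4]], 0)

def Spec_op5 (a : List (List Int)) (l : Int) (out : List (List Int)) : Prop := out = op5_alt a l
instance (a : List (List Int)) (l : Int) (out : List (List Int)) : Decidable (Spec_op5 a l out) := by unfold Spec_op5; infer_instance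

-- ===== CLAIM (what is proved, stated in full; the proofs are below) =====
def Claim_equal_op5 : Prop := ∀ (a : List (List Int)) (l : Int), Dom_op5 a l → Pre_op5 a l → Spec_op5 a l (op5 a l)

-- ===== LEMMAS AND PROOFS =====
def pvE (mat : List (List Int)) (r c : Nat) : Int := (mat.getD r []).getD c 0
def pvShape (mat : List (List Int)) (n : Nat) : Prop :=
  mat.length = n ∧ ∀ row ∈ mat, row.length = n

def pvFoldW (ws : List (Nat × Nat × Int)) (mat : List (List Int)) : List (List Int) :=
  ws.foldl (fun m t => pvWrite m t.1 t.2.1 t.2.2) mat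

-- the flat write list of A's four nested loops
def pvW (a : List (List Int)) (q s : Nat) : List (Nat × Nat × Int) :=
  (List.range q).flatMap (fun i => (List.range q).flatMap (fun j =>
    (List.range s).flatMap (fun x => (List.range s).map (fun y =>
      (i * s + x, j * s + y, (a.getD ((q - i - 1) * s + x) []).getD (j * s + y) 0)))))

-- a row-indexed map form both ports are reduced to
def pvAlt (a : List (List Int)) (q s n : Nat) : List (List Int) :=
  ((List.range (q * s)).map (fun r =>
      (a.getD ((q - 1 - r / s) * s + r % s) []).take (q * s) ++ List.replicate (n - q * s) 0))
  ++ (List.range (n - q * s)).map (fun _ => List.replicate n (0 : Int))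

theorem pv_op5_eq_fold (a : List (List Int)) (l : Int) :
    op5 a l = pvFoldW (pvW a (a.length / 2 ^ l.toNat) (2 ^ l.toNat))
      ((List.range a.length).map (fun _ => List.replicate a.length (0 : Int))) := by
  unfold op5 pvW pvFoldW
  simp only [List.foldl_flatMap, List.foldl_map]

-- a contiguous stretch of rows as a range-map
theorem pv_drop_take (a : List (List Int)) (j s : Nat) (h : j + s ≤ a.length) :
    (a.drop j).take s = (List.range s).map (fun r => a.getD (j + r) []) := by
  refine List.ext_getElem ?_ ?_
  · simp only [List.length_take, List.length_drop, List.length_map, List.length_range]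
    omega
  intro r hr hr'
  have hrs : r < s := by simpa using hr'
  simp only [List.getElem_take, List.getElem_drop, List.getElem_map, List.getElem_range]
  rw [List.getD_eq_getElem _ _ (by omega)]

-- reversed chunks flattened = row-indexed reflection map
theorem pv_chunks_rev (a : List (List Int)) (q s : Nat) (g : List Int → List Int)
    (hs : 0 < s) (h : q * s ≤ a.length) :
    (((List.range q).map (fun k => (a.drop (k * s)).take s)).reverse.flatMap
        (fun blk => blk.map g))
      = (List.range (q * s)).map (fun r => g (a.getD ((q - 1 - r / s) * s + r % s) [])) := by
  induction q with
  | zero => simp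
  | succ q ih =>
    have hq : q * s ≤ a.length := le_trans (by nlinarith) h
    rw [List.range_succ, List.map_append, List.reverse_append, List.flatMap_append,
      ih hq]
    have hrange : List.range ((q + 1) * s) = List.range s ++ (List.range (q * s)).map (s + ·) := by
      have : (q + 1) * s = s + q * s := by ring
      rw [this, List.range_add]
    rw [hrange, List.map_append, List.map_map]
    congr 1
    · simp only [List.map_cons, List.map_nil, List.reverse_cons, List.reverse_nil,
        List.nil_append, List.flatMap_cons, List.flatMap_nil, List.append_nil]
      rw [pv_drop_take a (q * s) s (by nlinarith)]
      rw [List.map_map]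
      refine List.map_congr_left ?_
      intro r hr
      simp only [Function.comp, List.mem_range] at hr ⊢
      have h1 : r / s = 0 := Nat.div_eq_of_lt hr
      have h2 : r % s = r := Nat.mod_eq_of_lt hr
      have h3 : q + 1 - 1 - 0 = q := by omega
      rw [h1, h2, h3]
    · refine List.map_congr_left ?_
      intro r hr
      simp only [Function.comp, List.mem_range] at hr ⊢
      have h1 : (s + r) / s = r / s + 1 := by
        rw [Nat.add_comm, Nat.add_div_right _ hs]
      have h2 : (s + r) % s = r % s := by
        rw [Nat.add_comm, Nat.add_mod_right]
      have h3 : q + 1 - 1 - (r / s + 1) = q - 1 - r / s := by omega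
      rw [h1, h2, h3]

theorem pv_op5_alt_eq (a : List (List Int)) (l : Int) :
    op5_alt a l = pvAlt a (a.length / 2 ^ l.toNat) (2 ^ l.toNat) a.length := by
  unfold op5_alt pvAlt
  simp only
  set s := 2 ^ l.toNat with hs
  set n := a.length with hn
  set q := n / s with hq
  have hspos : 0 < s := Nat.two_pow_pos _
  have hm : q * s ≤ n := Nat.div_mul_le_self _ _
  congr 1
  have hsl : ∀ k, PySem.List.slice a (some ((k * s : Nat) : Int)) (some (((k + 1) * s : Nat) : Int))
      = (a.drop (k * s)).take s := by
    intro k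
    rw [PySem.List.slice_natCast]
    congr 1
    rw [Nat.succ_mul]
    omega
  simp only [hsl]
  rw [pv_chunks_rev a q s
      (fun row => PySem.List.slice row none (some ((q * s : Nat) : Int)) ++ List.replicate (n - q * s) (0 : Int))
      hspos hm]
  refine List.map_congr_left ?_
  intro r _
  rw [PySem.List.slice_to_natCast]

theorem pvShape_pvWrite {mat : List (List Int)} {n : Nat} {r c : Nat} {v : Int}
    (h : pvShape mat n) : pvShape (pvWrite mat r c v) n := by
  obtain ⟨h1, h2⟩ := h
  by_cases hr : r < mat.length
  · refine ⟨by simp [pvWrite, h1], ?_⟩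
    intro row hrow
    rcases List.mem_or_eq_of_mem_set hrow with h | h
    · exact h2 _ h
    · subst h
      rw [List.length_set, List.getD_eq_getElem _ _ hr]
      exact h2 _ (List.getElem_mem hr)
  · rw [pvWrite, List.set_eq_of_length_le (by omega)]
    exact ⟨h1, h2⟩

theorem pvE_pvWrite_same {mat : List (List Int)} {r c : Nat} {v : Int}
    (h1 : r < mat.length) (h2 : c < (mat.getD r []).length) :
    pvE (pvWrite mat r c v) r c = v := by
  unfold pvE pvWrite
  simp only [List.getD_eq_getElem?_getD]
  rw [List.getElem?_set_self (by simpa using h1)]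
  simp only [Option.getD_some]
  rw [List.getElem?_set_self (by simpa [List.getD_eq_getElem?_getD] using h2)]
  simp

theorem pvE_pvWrite_ne {mat : List (List Int)} {r c r' c' : Nat} {v : Int}
    (h : r' ≠ r ∨ c' ≠ c) : pvE (pvWrite mat r c v) r' c' = pvE mat r' c' := by
  unfold pvE pvWrite
  simp only [List.getD_eq_getElem?_getD]
  rcases h with h | h
  · rw [List.getElem?_set_ne (by omega)]
  · by_cases hrr : r' = r
    · subst hrr
      by_cases hlt : r' < mat.length
      · rw [List.getElem?_set_self (by simpa using hlt)]
        simp only [Option.getD_some]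
        rw [List.getElem?_set_ne (by omega)]
      · rw [List.set_eq_of_length_le (by omega)]
    · rw [List.getElem?_set_ne (by omega)]

theorem pvShape_pvFoldW {ws : List (Nat × Nat × Int)} {mat : List (List Int)} {n : Nat}
    (h : pvShape mat n) : pvShape (pvFoldW ws mat) n := by
  induction ws generalizing mat with
  | nil => exact h
  | cons t tl ih => exact ih (pvShape_pvWrite h)

theorem pvE_pvFoldW_ne {ws : List (Nat × Nat × Int)} {mat : List (List Int)} {r c : Nat}
    (h : ∀ t ∈ ws, ¬(t.1 = r ∧ t.2.1 = c)) : pvE (pvFoldW ws mat) r c = pvE mat r c := by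
  induction ws generalizing mat with
  | nil => rfl
  | cons t tl ih =>
    rw [pvFoldW, List.foldl_cons, ← pvFoldW, ih (fun t ht => h t (List.mem_cons_of_mem _ ht))]
    have := h t List.mem_cons_self
    exact pvE_pvWrite_ne (by omega)

theorem pvE_pvFoldW_mem {ws : List (Nat × Nat × Int)} {mat : List (List Int)} {n r c : Nat}
    {v : Int} (hs : pvShape mat n) (hr : r < n) (hc : c < n)
    (hv : ∀ t ∈ ws, t.1 = r → t.2.1 = c → t.2.2 = v)
    (hex : ∃ t ∈ ws, t.1 = r ∧ t.2.1 = c) :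
    pvE (pvFoldW ws mat) r c = v := by
  induction ws generalizing mat with
  | nil => simp at hex
  | cons t tl ih =>
    rw [pvFoldW, List.foldl_cons, ← pvFoldW]
    by_cases hex' : ∃ t ∈ tl, t.1 = r ∧ t.2.1 = c
    · exact ih (pvShape_pvWrite hs) (fun t ht => hv t (List.mem_cons_of_mem _ ht)) hex'
    · have ht : t.1 = r ∧ t.2.1 = c := by
        rcases hex with ⟨t', ht', h'⟩
        rcases List.mem_cons.mp ht' with rfl | hmem
        · exact h'
        · exact absurd ⟨t', hmem, h'⟩ hex'
      have hvt : t.2.2 = v := hv t List.mem_cons_self ht.1 ht.2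
      rw [pvE_pvFoldW_ne (fun t' ht' h' => hex' ⟨t', ht', h'⟩)]
      obtain ⟨ht1, ht2⟩ := ht
      have hlen := hs.1
      rw [ht1, ht2, ← hvt]
      refine pvE_pvWrite_same (by omega) ?_
      rw [List.getD_eq_getElem _ _ (by omega), hs.2 _ (List.getElem_mem (by omega))]
      omega

theorem pv_mem_pvW {a : List (List Int)} {q s : Nat} {t : Nat × Nat × Int} :
    t ∈ pvW a q s ↔ ∃ i < q, ∃ j < q, ∃ x < s, ∃ y < s,
      t = (i * s + x, j * s + y, (a.getD ((q - i - 1) * s + x) []).getD (j * s + y) 0) := by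
  simp only [pvW, List.mem_flatMap, List.mem_map, List.mem_range]
  constructor
  · rintro ⟨i, hi, j, hj, x, hx, y, hy, rfl⟩
    exact ⟨i, hi, j, hj, x, hx, y, hy, rfl⟩
  · rintro ⟨i, hi, j, hj, x, hx, y, hy, rfl⟩
    exact ⟨i, hi, j, hj, x, hx, y, hy, rfl⟩

theorem pvShape_ans0 (n : Nat) :
    pvShape ((List.range n).map (fun _ => List.replicate n (0 : Int))) n := by
  constructor
  · simp
  · intro row hrow
    simp only [List.mem_map] at hrow
    obtain ⟨_, _, rfl⟩ := hrow
    simp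

theorem pvE_ans0 (n r c : Nat) :
    pvE ((List.range n).map (fun _ => List.replicate n (0 : Int))) r c = 0 := by
  unfold pvE
  simp only [List.getD_eq_getElem?_getD, List.getElem?_map]
  rcases Nat.lt_or_ge r n with h | h
  · rw [List.getElem?_range h]
    simp only [Option.map_some, Option.getD_some, List.getElem?_replicate]
    split <;> simp
  · rw [show (List.range n)[r]? = none from List.getElem?_eq_none (by simpa using h)]
    simp

-- unique decomposition r = i*s + x with x < s
theorem pv_decomp {r i x s : Nat} (hs : 0 < s) (hx : x < s)
    (h : i * s + x = r) : i = r / s ∧ x = r % s := by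
  have hcm : s * i = i * s := Nat.mul_comm s i
  have h2 : x + s * i = r := by omega
  have := (Nat.div_mod_unique hs).mpr ⟨h2, hx⟩
  omega

theorem pv_block_lt {i x q s : Nat} (hi : i < q) (hx : x < s) : i * s + x < q * s :=
  calc i * s + x < i * s + s := by omega
    _ = (i + 1) * s := by ring
    _ ≤ q * s := Nat.mul_le_mul_right _ (by omega)

theorem pv_src_lt {r q s : Nat} (hs : 0 < s) (hr : r < q * s) :
    (q - 1 - r / s) * s + r % s < q * s := by
  have hq : 0 < q := by
    rcases Nat.eq_zero_or_pos q with h | h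
    · subst h; simp at hr
    · exact h
  have h2 : q - 1 - r / s ≤ q - 1 := Nat.sub_le _ _
  exact pv_block_lt (by omega) (Nat.mod_lt _ hs)

theorem pvE_pvW_fold (a : List (List Int)) (q s n r c : Nat) (hspos : 0 < s)
    (hr : r < n) (hc : c < n) :
    pvE (pvFoldW (pvW a q s) ((List.range n).map (fun _ => List.replicate n (0 : Int)))) r c =
      (if r < q * s ∧ c < q * s
       then (a.getD ((q - 1 - r / s) * s + r % s) []).getD c 0 else 0) := by
  split
  · rename_i hin
    obtain ⟨hrm, hcm⟩ := hin
    refine pvE_pvFoldW_mem (pvShape_ans0 n) hr hc ?_ ?_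
    · intro t ht h1 h2
      rw [pv_mem_pvW] at ht
      obtain ⟨i, hi, j, hj, x, hx, y, hy, rfl⟩ := ht
      simp only at h1 h2 ⊢
      obtain ⟨hie, hxe⟩ := pv_decomp hspos hx h1
      have he : q - i - 1 = q - 1 - r / s := by omega
      rw [he, ← hxe, h2]
    · have hiq : r / s < q := by
        have := pv_block_lt (i := r / s) (x := 0) (q := q) (s := s)
        by_contra hcon
        have h1 : q * s ≤ r / s * s := Nat.mul_le_mul_right _ (by omega)
        have h2 : r / s * s ≤ r := by
          have := Nat.div_add_mod r s
          have := Nat.mul_comm s (r / s)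
          omega
        omega
      have hjq : c / s < q := by
        by_contra hcon
        have h1 : q * s ≤ c / s * s := Nat.mul_le_mul_right _ (by omega)
        have h2 : c / s * s ≤ c := by
          have := Nat.div_add_mod c s
          have := Nat.mul_comm s (c / s)
          omega
        omega
      refine ⟨(r / s * s + r % s, c / s * s + c % s,
        (a.getD ((q - r / s - 1) * s + r % s) []).getD (c / s * s + c % s) 0), ?_, ?_, ?_⟩
      · rw [pv_mem_pvW]
        exact ⟨r / s, hiq, c / s, hjq, r % s, Nat.mod_lt _ hspos, c % s, Nat.mod_lt _ hspos, rfl⟩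
      · simp only
        have := Nat.div_add_mod r s
        have := Nat.mul_comm s (r / s)
        omega
      · simp only
        have := Nat.div_add_mod c s
        have := Nat.mul_comm s (c / s)
        omega
  · rename_i hout
    rw [pvE_pvFoldW_ne, pvE_ans0]
    intro t ht
    rw [pv_mem_pvW] at ht
    obtain ⟨i, hi, j, hj, x, hx, y, hy, rfl⟩ := ht
    simp only [not_and]
    intro h1 h2
    have h3 := pv_block_lt hi hx
    have h4 := pv_block_lt hj hy
    omega

theorem pvShape_pvAlt (a : List (List Int)) (q s n : Nat) (hspos : 0 < s)
    (hm : q * s ≤ n) (hrows : ∀ i < q * s, q * s ≤ (a.getD i []).length) :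
    pvShape (pvAlt a q s n) n := by
  constructor
  · simp only [pvAlt, List.length_append, List.length_map, List.length_range]
    omega
  · intro row hrow
    simp only [pvAlt, List.mem_append, List.mem_map, List.mem_range] at hrow
    rcases hrow with ⟨r, hrm, rfl⟩ | ⟨_, _, rfl⟩
    · have := hrows _ (pv_src_lt hspos hrm)
      simp only [List.length_append, List.length_take, List.length_replicate]
      omega
    · simp

theorem pvE_pvAlt (a : List (List Int)) (q s n r c : Nat) (hspos : 0 < s)
    (hm : q * s ≤ n) (hr : r < n) (hc : c < n)
    (hrows : ∀ i < q * s, q * s ≤ (a.getD i []).length) :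
    pvE (pvAlt a q s n) r c =
      (if r < q * s ∧ c < q * s
       then (a.getD ((q - 1 - r / s) * s + r % s) []).getD c 0 else 0) := by
  unfold pvE pvAlt
  simp only [List.getD_eq_getElem?_getD]
  by_cases hrm : r < q * s
  · rw [List.getElem?_append_left (by simpa using hrm), List.getElem?_map,
      List.getElem?_range hrm]
    simp only [Option.map_some, Option.getD_some]
    have hlen : q * s ≤ (a.getD ((q - 1 - r / s) * s + r % s) []).length :=
      hrows _ (pv_src_lt hspos hrm)
    simp only [List.getD_eq_getElem?_getD] at hlen
    by_cases hcm : c < q * s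
    · rw [if_pos ⟨hrm, hcm⟩,
        List.getElem?_append_left (by simp only [List.length_take]; omega),
        List.getElem?_take, if_pos hcm]
    · rw [if_neg (by omega),
        List.getElem?_append_right (by simp only [List.length_take]; omega),
        List.getElem?_replicate]
      simp only [List.length_take]
      split <;> simp
  · rw [if_neg (by omega),
      List.getElem?_append_right (by simpa using hrm)]
    simp only [List.length_map, List.length_range, List.getElem?_map]
    rw [List.getElem?_range (by omega)]
    simp only [Option.map_some, Option.getD_some, List.getElem?_replicate]
    split <;> simp

theorem pvShape_op5 (a : List (List Int)) (l : Int) : pvShape (op5 a l) a.length := by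
  rw [pv_op5_eq_fold]; exact pvShape_pvFoldW (pvShape_ans0 _)

theorem pv_mat_ext {M M' : List (List Int)} {n : Nat}
    (h1 : pvShape M n) (h2 : pvShape M' n)
    (h : ∀ r < n, ∀ c < n, pvE M r c = pvE M' r c) : M = M' := by
  obtain ⟨hl1, hr1⟩ := h1
  obtain ⟨hl2, hr2⟩ := h2
  refine List.ext_getElem (by omega) ?_
  intro r hr hr'
  have hrn : r < n := by omega
  refine List.ext_getElem ?_ ?_
  · rw [hr1 _ (List.getElem_mem hr), hr2 _ (List.getElem_mem hr')]
  · intro c hcl hcr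
    have hcn : c < n := by rw [hr1 _ (List.getElem_mem hr)] at hcl; omega
    have := h r hrn c hcn
    unfold pvE at this
    rw [List.getD_eq_getElem _ _ hr, List.getD_eq_getElem _ _ hr',
      List.getD_eq_getElem _ _ hcl, List.getD_eq_getElem _ _ hcr] at this
    exact this

-- ===== VERDICT (by name: the statement is the Claim_ definition above) =====
theorem op5_spec : Claim_equal_op5 := by
  intro a l _ hp
  obtain ⟨_, hrows⟩ := hp
  unfold Spec_op5
  have hspos : 0 < 2 ^ l.toNat := Nat.two_pow_pos _
  have hm : a.length / 2 ^ l.toNat * 2 ^ l.toNat ≤ a.length := Nat.div_mul_le_self _ _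
  rw [pv_op5_eq_fold, pv_op5_alt_eq]
  refine pv_mat_ext (by rw [← pv_op5_eq_fold]; exact pvShape_op5 a l)
    (pvShape_pvAlt _ _ _ _ hspos hm hrows) ?_
  intro r hr c hc
  rw [pvE_pvW_fold _ _ _ _ _ _ hspos hr hc, pvE_pvAlt _ _ _ _ _ _ hspos hm hr hc hrows]
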